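-- pv_equiv track=rewrite | github.com/car-cas/EncryptAndDescryptCrakingWithPython | enrcyptAndDecrypt.py | getBlocksFromText
-- ===== SOURCE A (Python) =====
-- SYMBOLS = 'ABCDEFGHIJKLMNOPQRSTUVWXYZabcdefghijklmnopqrstuvwxyz1234567890 !?.'
--
-- def getBlocksFromText(message, blockSize):
--     #Convierte un string a una lista de bloques
--     for character in message:
--         if character not in SYMBOLS:
--             return ""
--     blockInts = []
--     for blockStart in range(0, len(message), blockSize):
--         #Calculamos el bloque para el bloque de texto
--         blockInt = 0
--         for i in range(blockStart, min(blockStart + blockSize, len(message))):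
--             blockInt += (SYMBOLS.index(message[i])) * (len(SYMBOLS) ** (i % blockSize))
--         blockInts.append(blockInt)
--
--     return blockInts
-- ===== SOURCE B (Python) =====
-- SYMBOLS = 'ABCDEFGHIJKLMNOPQRSTUVWXYZabcdefghijklmnopqrstuvwxyz1234567890 !?.'
--
-- def getBlocksFromText(message, blockSize):
--     # Chunk the message and fold each chunk with Horner's rule (base len(SYMBOLS)),
--     # using a precomputed char->index table: no per-character index scan or ** .
--     if any(ch not in SYMBOLS for ch in message):
--         return ""
--     index = {ch: i for i, ch in enumerate(SYMBOLS)}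
--     base = len(SYMBOLS)
--     blocks = []
--     for start in range(0, len(message), blockSize):
--         n = 0
--         for ch in reversed(message[start:start + blockSize]):
--             n = n * base + index[ch]
--         blocks.append(n)
--     return blocks
-- ===== Notes on version B (the rewrite author's own statement) =====
-- stated objective: alternative
-- what changed: Each block is computed by Horner's rule over the reversed chunk with a precomputed char->index dict, replacing A's per-character SYMBOLS.index scan and fresh ** exponentiation; Pre_ excludes blockSize=0, where A raises ValueError, and messages with a character outside SYMBOLS, where A returns the string '' instead of a list of ints.
-- outside the precondition, e.g. on getBlocksFromText('a,b', 2): A returns '', B returns ''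
import Mathlib
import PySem

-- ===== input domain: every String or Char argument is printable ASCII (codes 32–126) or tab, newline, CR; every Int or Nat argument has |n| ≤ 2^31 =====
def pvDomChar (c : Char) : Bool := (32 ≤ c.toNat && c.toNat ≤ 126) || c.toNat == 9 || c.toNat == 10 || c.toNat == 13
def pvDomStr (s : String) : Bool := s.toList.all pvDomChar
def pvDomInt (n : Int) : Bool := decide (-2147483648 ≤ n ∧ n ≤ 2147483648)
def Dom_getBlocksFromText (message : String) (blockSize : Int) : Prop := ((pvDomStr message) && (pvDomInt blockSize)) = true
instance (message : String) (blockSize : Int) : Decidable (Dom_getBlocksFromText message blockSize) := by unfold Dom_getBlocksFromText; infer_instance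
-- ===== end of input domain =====

-- B computes each block by Horner's rule over the reversed chunk with a precomputed
-- char->index table, instead of A's per-character index scan and exponentiation.

-- ===== PORT A =====
def pySYMBOLS : List Char :=
  "ABCDEFGHIJKLMNOPQRSTUVWXYZabcdefghijklmnopqrstuvwxyz1234567890 !?.".toList

-- SYMBOLS.index(c); inside the ports the validity check guarantees c ∈ pySYMBOLS, so getD 0 is never the default
def symIdx (c : Char) : Int := ((PySem.List.index? pySYMBOLS c).getD 0 : Nat)

def getBlocksFromText (message : String) (blockSize : Int) : List Int :=
  let ml := message.toList
  -- 'for character in message: if character not in SYMBOLS: return ""' — Python returns the string "" there,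
  -- which is not a value of type List Int; those inputs are excluded by Pre_ and the port yields [].
  if ml.any (fun c => !(pySYMBOLS.contains c)) then []
  else
    (PySem.List.pyRange 0 (ml.length : Int) blockSize).foldl
      (fun blockInts blockStart =>
        let blockInt :=
          (PySem.List.pyRange blockStart (min (blockStart + blockSize) (ml.length : Int)) 1).foldl
            (fun acc i =>
              -- exponent i % blockSize: whenever this body runs, blockSize > 0, so the exponent is ≥ 0 and toNat is exact
              acc + symIdx (PySem.List.pyGetD ml i ' ')
                  * (pySYMBOLS.length : Int) ^ (PySem.Int.mod i blockSize).toNat)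
            0
        blockInts ++ [blockInt])
      []

-- ===== PORT B =====
-- index = {ch: i for i, ch in enumerate(SYMBOLS)}
def symDict : PySem.Dict Char Int :=
  (PySem.List.enumerate pySYMBOLS).foldl (fun d p => PySem.Dict.insert d p.2 p.1) PySem.Dict.empty

def getBlocksFromText_alt (message : String) (blockSize : Int) : List Int :=
  let ml := message.toList
  if ml.any (fun c => !(pySYMBOLS.contains c)) then [] -- Python B returns "" here; excluded by Pre_
  else
    (PySem.List.pyRange 0 (ml.length : Int) blockSize).foldl
      (fun blocks start =>
        let chunk := PySem.List.slice ml (some start) (some (start + blockSize))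
        let n := chunk.reverse.foldl
          (fun n c => n * (pySYMBOLS.length : Int) + PySem.Dict.getD symDict c 0) 0
        blocks ++ [n])
      []

-- ===== PRECONDITION & SPEC =====
-- Pre_ excludes (a) blockSize = 0, where Python A raises ValueError (range step 0), and
-- (b) messages with a character outside SYMBOLS, where Python A returns the string "" — not a list of ints.
def Pre_getBlocksFromText (message : String) (blockSize : Int) : Prop :=
  blockSize ≠ 0 ∧ message.toList.all (fun c => pySYMBOLS.contains c) = true
instance (message : String) (blockSize : Int) : Decidable (Pre_getBlocksFromText message blockSize) := by
  unfold Pre_getBlocksFromText; infer_instance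

def pvWitness_getBlocksFromText : String × Int := ("AB", 2)

def Spec_getBlocksFromText (message : String) (blockSize : Int) (out : List Int) : Prop := out = getBlocksFromText_alt message blockSize
instance (message : String) (blockSize : Int) (out : List Int) : Decidable (Spec_getBlocksFromText message blockSize out) := by unfold Spec_getBlocksFromText; infer_instance

-- ===== CLAIM (what is proved, stated in full; the proofs are below) =====
def Claim_equal_getBlocksFromText : Prop := ∀ (message : String) (blockSize : Int), Dom_getBlocksFromText message blockSize → Pre_getBlocksFromText message blockSize → Spec_getBlocksFromText message blockSize (getBlocksFromText message blockSize)

-- ===== LEMMAS AND PROOFS =====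

-- value of one block: characters cs, exponents starting at t
def cvalFrom (cs : List Char) (t : Nat) : Int :=
  ((List.range cs.length).map (fun u => symIdx (cs.getD u ' ') * 66 ^ (t + u))).sum

-- A's inner loop as a function of the character list
def innerA (xs : List Char) (bs b : Int) : Int :=
  (PySem.List.pyRange b (min (b + bs) (xs.length : Int)) 1).foldl
    (fun acc i => acc + symIdx (PySem.List.pyGetD xs i ' ') * 66 ^ (PySem.Int.mod i bs).toNat) 0

lemma symlen_eq : (pySYMBOLS.length : Int) = 66 := by
  norm_num [show pySYMBOLS.length = 66 from rfl]

lemma nodup_pySYMBOLS : pySYMBOLS.Nodup := by decide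

lemma items_symDict :
    symDict.items = (PySem.List.enumerate pySYMBOLS).map (fun p => (p.2, p.1)) := by
  have hfresh : ∀ p ∈ PySem.List.enumerate pySYMBOLS,
      PySem.Dict.contains (PySem.Dict.empty : PySem.Dict Char Int) p.2 = false := by
    intro p _; simp [PySem.Dict.contains_empty]
  have hnd : ((PySem.List.enumerate pySYMBOLS).map (fun p => p.2)).Nodup := by
    rw [PySem.List.map_snd_enumerate]; exact nodup_pySYMBOLS
  simpa [symDict] using
    PySem.Dict.items_foldl_insert_fresh (l := PySem.List.enumerate pySYMBOLS)
      (k := fun p => p.2) (v := fun p => p.1) (d := PySem.Dict.empty) hfresh hnd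

lemma dict_eq_symIdx (c : Char) (hc : c ∈ pySYMBOLS) :
    PySem.Dict.getD symDict c 0 = symIdx c := by
  obtain ⟨k, hk⟩ := Option.isSome_iff_exists.mp ((PySem.List.index?_isSome_iff pySYMBOLS c).mpr hc)
  obtain ⟨hlt, hget, -⟩ := PySem.List.getElem_of_index?_eq_some hk
  have hkeys : symDict.keys.Nodup := by
    have : symDict.keys = pySYMBOLS := by
      simp only [PySem.Dict.keys, items_symDict, List.map_map]
      exact PySem.List.map_snd_enumerate pySYMBOLS 0
    rw [this]; exact nodup_pySYMBOLS
  have hmem : (c, (k : Int)) ∈ symDict.items := by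
    rw [items_symDict]
    refine List.mem_map.mpr ⟨((k : Int), c), ?_, rfl⟩
    have h2 : (PySem.List.enumerate pySYMBOLS)[k]'(by
        rwa [PySem.List.length_enumerate]) = ((0 : Int) + k, pySYMBOLS[k]) :=
      PySem.List.getElem_enumerate ..
    rw [hget] at h2
    have h3 : ((0 : Int) + (k : Int), c) ∈ PySem.List.enumerate pySYMBOLS := h2 ▸ List.getElem_mem _
    simpa using h3
  have := PySem.Dict.getD_of_mem_items symDict hmem hkeys 0
  rw [this, symIdx, hk]; rfl

lemma cvalFrom_nil (t : Nat) : cvalFrom [] t = 0 := rfl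

lemma cvalFrom_cons (c : Char) (cs : List Char) (t : Nat) :
    cvalFrom (c :: cs) t = symIdx c * 66 ^ t + cvalFrom cs (t + 1) := by
  simp only [cvalFrom, List.length_cons, List.range_succ_eq_map, List.map_cons, List.map_map,
    List.sum_cons, List.getD_cons_zero, Nat.add_zero]
  congr 1
  congr 1
  apply List.map_congr_left
  intro u hu
  simp only [Function.comp_apply, List.getD_cons_succ]
  rw [show t + (u + 1) = t + 1 + u from by omega]

lemma cvalFrom_shift (cs : List Char) : ∀ t, cvalFrom cs (t + 1) = 66 * cvalFrom cs t := by
  induction cs with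
  | nil => intro t; simp [cvalFrom_nil]
  | cons c cs ih =>
    intro t
    rw [cvalFrom_cons, cvalFrom_cons, ih (t + 1)]
    rw [pow_succ]
    ring

-- B's Horner fold over the reversed chunk computes the block value
lemma horner_eq (cs : List Char) (h : ∀ c ∈ cs, c ∈ pySYMBOLS) :
    cs.reverse.foldl
      (fun n c => n * (pySYMBOLS.length : Int) + PySem.Dict.getD symDict c 0) 0
      = cvalFrom cs 0 := by
  rw [List.foldl_reverse]
  induction cs with
  | nil => simp [cvalFrom_nil]
  | cons c cs ih =>
    rw [List.foldr_cons, ih (fun x hx => h x (List.mem_cons_of_mem _ hx))]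
    rw [cvalFrom_cons, cvalFrom_shift, symlen_eq,
      dict_eq_symIdx c (h c List.mem_cons_self)]
    ring

lemma A_inner (bs : Nat) (hbs : 0 < bs) (xs : List Char) (m : Nat) :
    innerA xs (bs : Int) ((m * bs : Nat) : Int) = cvalFrom ((xs.drop (m * bs)).take bs) 0 := by
  rw [innerA, PySem.List.pyRange_one, List.foldl_map]
  rw [PySem.List.foldl_add]
  rw [cvalFrom]
  have hcnt : (min (((m * bs : Nat) : Int) + (bs : Int)) ((xs.length : Int)) - ((m * bs : Nat) : Int)).toNat
      = ((xs.drop (m * bs)).take bs).length := by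
    simp only [List.length_take, List.length_drop]
    omega
  rw [hcnt, zero_add]
  congr 1
  apply List.map_congr_left
  intro k hk
  simp only [List.mem_range, List.length_take, List.length_drop] at hk
  have hklt : k < bs := by omega
  have hidx : m * bs + k < xs.length := by omega
  have hc1 : ((m * bs : Nat) : Int) + (k : Int) = ((m * bs + k : Nat) : Int) := by push_cast; ring
  rw [hc1, PySem.List.pyGetD_natCast]
  have hmod : PySem.Int.mod ((m * bs + k : Nat) : Int) (bs : Int) = (k : Int) := by
    rw [PySem.Int.mod_natCast]
    norm_num [Nat.mul_add_mod, Nat.mod_eq_of_lt hklt]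
  rw [hmod]
  have hg1 : xs.getD (m * bs + k) ' ' = xs[m * bs + k]'hidx := PySem.List.getD_eq_getElem_of_lt xs (m * bs + k) ' ' hidx
  have hklt' : k < ((xs.drop (m * bs)).take bs).length := by
    simp only [List.length_take, List.length_drop]; omega
  have hg2 : ((xs.drop (m * bs)).take bs).getD k ' ' = xs[m * bs + k]'hidx := by
    rw [PySem.List.getD_eq_getElem_of_lt _ _ _ hklt']
    rw [List.getElem_take, List.getElem_drop]
  rw [hg1, hg2]
  norm_num

-- ===== VERDICT (by name: the statement is the Claim_ definition above) =====
theorem getBlocksFromText_spec : Claim_equal_getBlocksFromText := by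
  intro message blockSize _ hpre
  obtain ⟨hne, hvalb⟩ := hpre
  have hval : ∀ c ∈ message.toList, c ∈ pySYMBOLS := by
    intro c hc
    simpa using List.all_eq_true.mp hvalb c hc
  show getBlocksFromText message blockSize = getBlocksFromText_alt message blockSize
  have hany : message.toList.any (fun c => !(pySYMBOLS.contains c)) = false := by
    rw [List.any_eq_false]
    intro c hc
    simp [hval c hc]
  rcases lt_trichotomy blockSize 0 with hneg | hzero | hpos
  · -- negative blockSize: the range is empty, both return []
    rw [getBlocksFromText, getBlocksFromText_alt]
    simp only [hany, Bool.false_eq_true, if_false]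
    rw [PySem.List.pyRange_of_neg _ _ hneg,
      if_neg (by simp : ¬ ((message.toList.length : Int) < 0))]
    simp
  · exact absurd hzero hne
  · -- positive blockSize: both compute the same chunk values
    lift blockSize to ℕ using hpos.le with bs
    have hbs : 0 < bs := by exact_mod_cast hpos
    rw [getBlocksFromText, getBlocksFromText_alt]
    simp only [hany, Bool.false_eq_true, if_false]
    rw [PySem.List.foldl_append_singleton_eq_map, PySem.List.foldl_append_singleton_eq_map]
    rw [PySem.List.pyRange_of_pos _ _ (by exact_mod_cast hbs)]
    rw [List.map_map, List.map_map, List.nil_append, List.nil_append]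
    apply List.map_congr_left
    intro k hk
    simp only [Function.comp_apply]
    have hstart : (0 : Int) + (bs : Int) * (k : Int) = ((k * bs : Nat) : Int) := by push_cast; ring
    rw [hstart]
    have hchunk : PySem.List.slice message.toList (some ((k * bs : Nat) : Int))
        (some (((k * bs : Nat) : Int) + (bs : Int)))
        = (message.toList.drop (k * bs)).take bs :=
      PySem.List.slice_natCast_add ..
    have hB : ((message.toList.drop (k * bs)).take bs).reverse.foldl
        (fun n c => n * (pySYMBOLS.length : Int) + PySem.Dict.getD symDict c 0) 0
        = cvalFrom ((message.toList.drop (k * bs)).take bs) 0 := by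
      apply horner_eq
      intro c hc
      exact hval c (List.mem_of_mem_drop (List.mem_of_mem_take hc))
    show innerA message.toList (bs : Int) ((k * bs : Nat) : Int) = _
    rw [A_inner bs hbs _ k, hchunk, hB]
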